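-- pv_equiv track=rewrite | github.com/CepisV/PythonHW | lesson7/les7.py | KthAppearance
-- ===== SOURCE A (Python) =====
-- def KthAppearance(A, a, k):
--     count = 0
--     for i in range(len(A)):
--         if A[i] == a:
--             count += 1
--             if count == k:
--                 return i
--     return -1
-- ===== SOURCE B (Python) =====
-- def KthAppearance(A, a, k):
--     if k < 1:
--         return -1
--     try:
--         i = A.index(a)
--     except ValueError:
--         return -1
--     if k == 1:
--         return i
--     rest = KthAppearance(A[i + 1:], a, k - 1)
--     return -1 if rest == -1 else i + 1 + rest
-- ===== Notes on version B (the rewrite author's own statement) =====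
-- stated objective: alternative
-- what changed: Recursive divide-and-conquer on occurrences: locate the first occurrence with list.index, slice past it and recurse for the (k-1)-th, offsetting the result, instead of A's single indexed counting scan with early return.
import Mathlib
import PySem

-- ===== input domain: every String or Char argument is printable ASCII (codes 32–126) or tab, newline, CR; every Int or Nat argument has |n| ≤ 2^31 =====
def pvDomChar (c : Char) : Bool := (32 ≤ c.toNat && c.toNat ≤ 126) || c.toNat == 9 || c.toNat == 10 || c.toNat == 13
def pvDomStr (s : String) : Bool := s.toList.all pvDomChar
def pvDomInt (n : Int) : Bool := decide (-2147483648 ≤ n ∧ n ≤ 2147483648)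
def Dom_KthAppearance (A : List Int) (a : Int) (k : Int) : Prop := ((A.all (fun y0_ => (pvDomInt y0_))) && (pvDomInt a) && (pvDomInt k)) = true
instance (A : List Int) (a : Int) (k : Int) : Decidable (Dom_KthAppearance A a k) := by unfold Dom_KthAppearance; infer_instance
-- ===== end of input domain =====

-- B recursively finds the first occurrence with list.index and recurses on the slice past it for the (k-1)-th, instead of A's counter scan; alternative decomposition, not faster (slice copies).


-- ===== PORT A =====
-- loop over indices carrying the running count, early return on count == k
def KthAppearanceGo (a : Int) (k : Int) : List Int → Int → Int → Int
  | [], _, _ => -1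
  | x :: xs, i, count =>
    if x = a then
      if count + 1 = k then i else KthAppearanceGo a k xs (i + 1) (count + 1)
    else KthAppearanceGo a k xs (i + 1) count

def KthAppearance (A : List Int) (a : Int) (k : Int) : Int :=
  KthAppearanceGo a k A 0 0

-- ===== PORT B =====
-- recursive: first occurrence via A.index(a) (= PySem.List.index?), then recurse on the slice A[i+1:]
def KthAppearance_alt (A : List Int) (a : Int) (k : Int) : Int :=
  if k < 1 then -1
  else
    match h : PySem.List.index? A a with
    | none => -1
    | some i =>
      if k = 1 then (i : Int)
      else
        let rest := KthAppearance_alt (PySem.List.slice A (some ((i : Int) + 1)) none) a (k - 1)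
        if rest = -1 then -1 else (i : Int) + 1 + rest
termination_by A.length
decreasing_by
  obtain ⟨hk, -, -⟩ := PySem.List.getElem_of_index?_eq_some h
  have : ((i : Int) + 1) = ((i + 1 : Nat) : Int) := by push_cast; ring
  rw [this, PySem.List.slice_from_natCast]
  simp [List.length_drop]; omega

-- ===== PRECONDITION & SPEC =====
def Spec_KthAppearance (A : List Int) (a : Int) (k : Int) (out : Int) : Prop := out = KthAppearance_alt A a k
instance (A : List Int) (a : Int) (k : Int) (out : Int) : Decidable (Spec_KthAppearance A a k out) := by unfold Spec_KthAppearance; infer_instance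

-- ===== CLAIM =====
def Claim_equal_KthAppearance : Prop := ∀ (A : List Int) (a : Int) (k : Int), Dom_KthAppearance A a k → Spec_KthAppearance A a k (KthAppearance A a k)

-- ===== LEMMAS AND PROOFS =====
-- hits a xs = the (Nat) indices of occurrences of a in xs
def pvHits (a : Int) : List Int → List Nat
  | [] => []
  | x :: xs => if x = a then 0 :: (pvHits a xs).map (· + 1) else (pvHits a xs).map (· + 1)

theorem pvHits_head (a : Int) (xs : List Int) :
    PySem.List.index? xs a = (pvHits a xs).head? := by
  induction xs with
  | nil => rfl
  | cons x xs ih =>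
    by_cases hx : x = a
    · subst hx; rw [PySem.List.index?_cons_self]; simp [pvHits]
    · rw [PySem.List.index?_cons_of_ne xs hx, ih]
      simp [pvHits, hx, List.head?_map]

theorem pvHits_drop (a : Int) (xs : List Int) (i : Nat)
    (h : PySem.List.index? xs a = some i) :
    pvHits a xs = i :: (pvHits a (xs.drop (i + 1))).map (· + (i + 1)) := by
  induction xs generalizing i with
  | nil => simp [PySem.List.index?] at h
  | cons x xs ih =>
    by_cases hx : x = a
    · subst hx
      rw [PySem.List.index?_cons_self] at h
      obtain rfl : i = 0 := by simpa using h.symm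
      simp [pvHits]
    · rw [PySem.List.index?_cons_of_ne xs hx] at h
      obtain ⟨j, hj, rfl⟩ := Option.map_eq_some_iff.mp h
      rw [show pvHits a (x :: xs) = (pvHits a xs).map (· + 1) by simp [pvHits, hx]]
      rw [ih j hj]
      simp only [List.map_cons, List.map_map, List.drop_succ_cons]
      refine List.cons_eq_cons.mpr ⟨by omega, ?_⟩
      apply List.map_congr_left
      intro b _
      simp only [Function.comp_apply]
      omega

-- getD of an in-range index through a map
theorem pvGetD_map_add (l : List Nat) (c : Nat) (j : Nat) (hj : j < l.length) :
    (l.map (· + c)).getD j 0 = l.getD j 0 + c := by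
  rw [List.getD_eq_getElem _ _ (by simpa using hj), List.getD_eq_getElem _ _ hj]
  simp

-- A's loop computes the guarded selection from the hits table
theorem pvGo_eq (a k : Int) : ∀ (xs : List Int) (i c : Int),
    KthAppearanceGo a k xs i c =
      if 1 ≤ k - c ∧ k - c ≤ ((pvHits a xs).length : Int) then
        i + ((pvHits a xs).getD (k - c - 1).toNat 0 : Int)
      else -1 := by
  intro xs
  induction xs with
  | nil =>
    intro i c
    have hno : ¬(1 ≤ k - c ∧ k - c ≤ ((pvHits a ([] : List Int)).length : Int)) := by
      simp [pvHits]; omega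
    rw [KthAppearanceGo, if_neg hno]
  | cons x xs ih =>
    intro i c
    rw [KthAppearanceGo]
    by_cases hx : x = a
    · rw [if_pos hx, show pvHits a (x :: xs) = 0 :: (pvHits a xs).map (· + 1) by simp [pvHits, hx]]
      by_cases hk : c + 1 = k
      · have h1 : k - c = 1 := by omega
        simp [hk, h1]
      · rw [if_neg hk, ih]
        have hlen : (0 :: (pvHits a xs).map (· + 1)).length = (pvHits a xs).length + 1 := by simp
        by_cases hg : 1 ≤ k - (c + 1) ∧ k - (c + 1) ≤ ((pvHits a xs).length : Int)
        · rw [if_pos hg, if_pos (by rw [hlen]; push_cast; omega)]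
          have ht : (k - c - 1).toNat = (k - (c + 1) - 1).toNat + 1 := by omega
          rw [ht]
          have hj : (k - (c + 1) - 1).toNat < (pvHits a xs).length := by omega
          simp only [List.getD_cons_succ]
          rw [pvGetD_map_add _ 1 _ hj]
          push_cast; ring
        · rw [if_neg hg, if_neg (by rw [hlen]; push_cast; omega)]
    · rw [if_neg hx, ih,
        show pvHits a (x :: xs) = (pvHits a xs).map (· + 1) by simp [pvHits, hx]]
      by_cases hg : 1 ≤ k - c ∧ k - c ≤ ((pvHits a xs).length : Int)
      · rw [if_pos hg, if_pos (by simpa using hg)]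
        have hj : (k - c - 1).toNat < (pvHits a xs).length := by omega
        rw [pvGetD_map_add _ 1 _ hj]
        push_cast; ring
      · rw [if_neg hg, if_neg (by simpa using hg)]

-- B computes the same guarded selection from the hits table
theorem pvAlt_eq (a : Int) : ∀ (xs : List Int) (k : Int),
    KthAppearance_alt xs a k =
      if 1 ≤ k ∧ k ≤ ((pvHits a xs).length : Int) then
        ((pvHits a xs).getD (k - 1).toNat 0 : Int)
      else -1 := by
  intro xs
  induction hn : xs.length using Nat.strong_induction_on generalizing xs with
  | _ n ih =>
  intro k
  rw [KthAppearance_alt]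
  by_cases hk1 : k < 1
  · rw [if_pos hk1, if_neg (by omega)]
  · rw [if_neg hk1]
    split
    next h =>
      have hnil : pvHits a xs = [] := by
        have hh := pvHits_head a xs
        rw [h] at hh
        exact List.head?_eq_none_iff.mp hh.symm
      rw [hnil, if_neg (by simp; omega)]
    next i h =>
      obtain ⟨hi, -, -⟩ := PySem.List.getElem_of_index?_eq_some h
      have hdrop := pvHits_drop a xs i h
      have hcast : ((i : Int) + 1) = ((i + 1 : Nat) : Int) := by push_cast; ring
      rw [hcast, PySem.List.slice_from_natCast]
      have hlen : (pvHits a xs).length = (pvHits a (xs.drop (i + 1))).length + 1 := by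
        rw [hdrop]; simp
      by_cases hk : k = 1
      · subst hk
        have hcond : (1:Int) ≤ 1 ∧ (1:Int) ≤ ((pvHits a xs).length : Int) := by
          constructor
          · omega
          · rw [hlen]
            push_cast
            omega
        rw [if_pos rfl, if_pos hcond]
        rw [hdrop]; simp
      · rw [if_neg hk]
        have hlt : (xs.drop (i + 1)).length < n := by
          rw [List.length_drop]
          omega
        have hrec := ih ((xs.drop (i + 1)).length) hlt _ rfl (k - 1)
        set l := pvHits a (xs.drop (i + 1)) with hl
        by_cases hg : 1 ≤ k - 1 ∧ k - 1 ≤ (l.length : Int)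
        · rw [hrec, if_pos hg]
          have hj : (k - 1 - 1).toNat < l.length := by omega
          have hne : (l.getD (k - 1 - 1).toNat 0 : Int) ≠ -1 := by omega
          rw [if_neg hne, if_pos (by rw [hlen]; push_cast; omega)]
          rw [hdrop]
          have ht : (k - 1).toNat = (k - 1 - 1).toNat + 1 := by omega
          rw [ht]
          simp only [List.getD_cons_succ]
          rw [pvGetD_map_add _ (i + 1) _ hj]
          push_cast; ring
        · rw [hrec, if_neg hg, if_pos rfl, if_neg (by rw [hlen]; push_cast; omega)]

-- ===== VERDICT =====
theorem KthAppearance_spec : Claim_equal_KthAppearance := by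
  intro A a k _
  show KthAppearance A a k = KthAppearance_alt A a k
  rw [KthAppearance, pvGo_eq, pvAlt_eq]
  simp
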